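-- pv_equiv track=rewrite | github.com/McJRr/comment_tool | comment/id_zh.py | to_ten
-- ===== SOURCE A (Python) =====
-- str62keys = "0123456789abcdefghijklmnopqrstuvwxyzABCDEFGHIJKLMNOPQRSTUVWXYZ"
--
-- def to_ten(s):
--     """62进制转换为10进制"""
--     k = 1
--     ten_ret = 0
--     for i in s[::-1]:
--         x = str62keys.index(i) * k
--         ten_ret += x
--         k *= 62
--     str_ret = str(ten_ret)
--     if len(s) == 4:
--         str_ret = str_ret.rjust(7, '0')
--     return str_ret
-- ===== SOURCE B (Python) =====
-- str62keys = "0123456789abcdefghijklmnopqrstuvwxyz" \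
--             "ABCDEFGHIJKLMNOPQRSTUVWXYZ"
--
-- def to_ten(s):
--     """62进制转换为10进制 (Horner's method, left-to-right)"""
--     ten_ret = 0
--     for i in s:
--         ten_ret = ten_ret * 62 + str62keys.index(i)
--     str_ret = str(ten_ret)
--     if len(s) == 4:
--         str_ret = str_ret.rjust(7, '0')
--     return str_ret
-- ===== Notes on version B (the rewrite author's own statement) =====
-- stated objective: simpler
-- what changed: Replaces the reversed-string place-value accumulation (power variable k multiplied by 62 each step) with Horner's method scanning s left-to-right with a single accumulator, keeping str62keys.index so unknown characters still raise ValueError.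
import Mathlib
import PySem

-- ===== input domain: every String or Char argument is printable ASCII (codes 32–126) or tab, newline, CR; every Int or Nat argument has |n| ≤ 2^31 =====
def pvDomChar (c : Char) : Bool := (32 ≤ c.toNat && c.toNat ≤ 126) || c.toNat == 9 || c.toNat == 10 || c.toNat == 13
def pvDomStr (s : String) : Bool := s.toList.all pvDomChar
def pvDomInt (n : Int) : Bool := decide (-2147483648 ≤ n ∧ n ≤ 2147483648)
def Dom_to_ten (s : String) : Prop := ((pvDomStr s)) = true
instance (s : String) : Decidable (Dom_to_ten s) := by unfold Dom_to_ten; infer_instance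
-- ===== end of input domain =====

-- B replaces A's reversed-string place-value loop (power variable k) by a left-to-right
-- Horner accumulation: simpler, same exact output (ValueError inputs are outside Pre_).

def str62keys : String := "0123456789abcdefghijklmnopqrstuvwxyzABCDEFGHIJKLMNOPQRSTUVWXYZ"

-- str62keys.index(c): Python raises ValueError when c is absent; that case is excluded by
-- Pre_to_ten, so the port totalizes the absent case with getD 0.
def six2index (c : Char) : Int := ((PySem.List.index? str62keys.toList c).getD 0 : Nat)

-- str(t).rjust(7,'0') ported by hand, exact: left-pad with '0' up to width 7.
def rjust7zero (t : String) : String :=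
  String.ofList (List.replicate (7 - t.toList.length) '0' ++ t.toList)

-- ===== PORT A =====
def to_ten (s : String) : String :=
  -- k = 1; ten_ret = 0; for i in s[::-1]: x = index(i)*k; ten_ret += x; k *= 62
  let rev := (PySem.List.slice? s.toList none none (-1)).getD []
  let p := rev.foldl (fun (p : Int × Int) c => (p.1 * 62, p.2 + six2index c * p.1)) (1, 0)
  let str_ret := PySem.Int.toStr p.2
  if PySem.Str.len s = 4 then rjust7zero str_ret else str_ret

-- ===== PORT B =====
def to_ten_alt (s : String) : String :=
  -- ten_ret = 0; for i in s: ten_ret = ten_ret*62 + index(i)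
  let ten := s.toList.foldl (fun t c => t * 62 + six2index c) 0
  let str_ret := PySem.Int.toStr ten
  if PySem.Str.len s = 4 then rjust7zero str_ret else str_ret

-- ===== PRECONDITION & SPEC =====
-- Pre_ excludes exactly the strings containing a character outside str62keys, on which
-- Python's str.index raises ValueError (in A and in B alike).
def Pre_to_ten (s : String) : Prop := (s.toList.all (fun c => str62keys.toList.contains c)) = true
instance (s : String) : Decidable (Pre_to_ten s) := by unfold Pre_to_ten; infer_instance
def pvWitness_to_ten : String := "ab1"

def Spec_to_ten (s : String) (out : String) : Prop := out = to_ten_alt s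
instance (s : String) (out : String) : Decidable (Spec_to_ten s out) := by unfold Spec_to_ten; infer_instance

-- ===== CLAIM (what is proved, stated in full; the proofs are below) =====
def Claim_equal_to_ten : Prop := ∀ (s : String), Dom_to_ten s → Pre_to_ten s → Spec_to_ten s (to_ten s)

-- ===== LEMMAS AND PROOFS =====

-- value of a digit list read least-significant-first
def lsbVal : List Char → Int
  | [] => 0
  | c :: cs => six2index c + 62 * lsbVal cs

theorem foldA_val (r : List Char) : ∀ (k t : Int),
    (r.foldl (fun (p : Int × Int) c => (p.1 * 62, p.2 + six2index c * p.1)) (k, t)).2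
      = t + k * lsbVal r := by
  induction r with
  | nil => intro k t; simp [lsbVal]
  | cons c cs ih => intro k t; simp only [List.foldl_cons, lsbVal, ih]; ring

theorem lsbVal_append (r : List Char) (c : Char) :
    lsbVal (r ++ [c]) = lsbVal r + six2index c * 62 ^ r.length := by
  induction r with
  | nil => simp [lsbVal]
  | cons d ds ih => simp only [List.cons_append, lsbVal, ih, List.length_cons]; ring

theorem foldB_val (l : List Char) : ∀ (a : Int),
    l.foldl (fun t c => t * 62 + six2index c) a
      = a * 62 ^ l.length + lsbVal l.reverse := by
  induction l with
  | nil => intro a; simp [lsbVal]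
  | cons c cs ih =>
      intro a
      simp only [List.foldl_cons, ih, List.reverse_cons, lsbVal_append,
        List.length_reverse, List.length_cons]
      ring

-- ===== VERDICT (by name: the statement is the Claim_ definition above) =====
theorem to_ten_spec : Claim_equal_to_ten := by
  intro s _ _
  unfold Spec_to_ten to_ten to_ten_alt
  rw [PySem.List.slice?_none_none_neg_one]
  simp only [Option.getD_some, foldA_val, foldB_val]
  norm_num
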